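-- pv_equiv track=rewrite | github.com/CopticScriptorium/coptic-nlp | lib/ekthetic_para.py | ekthetic_to_para
-- ===== SOURCE A (Python) =====
-- def ekthetic_to_para(text,sep="<trans"):
-- 	out_units = []
-- 	units = text.split(sep)
-- 	for i, unit in enumerate(units):
-- 		if i == 0:
-- 			out_units.append(unit)
-- 		else:
-- 			unit = sep + unit
-- 			if "ekthetic" in unit:
-- 				unit = '<p p="p"/>' + unit
-- 			elif i == 1:  # Leading para
-- 				unit = '<p p="p"/>' + unit
-- 			out_units.append(unit)
-- 	return "".join(out_units)
-- ===== SOURCE B (Python) =====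
-- def ekthetic_to_para(text, sep="<trans"):
--     if not sep:
--         raise ValueError("empty separator")
--     k = text.find(sep)
--     if k == -1:
--         return text
--     return text[:k] + _tagged(text[k:], sep, True)
--
--
-- def _tagged(rest, sep, first):
--     # rest starts with sep; emit its first chunk (tagged if needed), recurse on the remainder
--     nxt = rest.find(sep, len(sep))
--     if nxt == -1:
--         chunk, tail = rest, None
--     else:
--         chunk, tail = rest[:nxt], rest[nxt:]
--     tag = '<p p="p"/>' if first or "ekthetic" in chunk else ""
--     return tag + chunk + ("" if tail is None else _tagged(tail, sep, False))
-- ===== Notes on version B (the rewrite author's own statement) =====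
-- stated objective: alternative
-- what changed: B replaces A's split()-into-a-list plus enumerate-indexed loop by a streaming recursion that walks the text with find(), emitting the prefix and then each sep-headed chunk (tagged if first or containing 'ekthetic') as it goes, never materialising the unit list.
import Mathlib
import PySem

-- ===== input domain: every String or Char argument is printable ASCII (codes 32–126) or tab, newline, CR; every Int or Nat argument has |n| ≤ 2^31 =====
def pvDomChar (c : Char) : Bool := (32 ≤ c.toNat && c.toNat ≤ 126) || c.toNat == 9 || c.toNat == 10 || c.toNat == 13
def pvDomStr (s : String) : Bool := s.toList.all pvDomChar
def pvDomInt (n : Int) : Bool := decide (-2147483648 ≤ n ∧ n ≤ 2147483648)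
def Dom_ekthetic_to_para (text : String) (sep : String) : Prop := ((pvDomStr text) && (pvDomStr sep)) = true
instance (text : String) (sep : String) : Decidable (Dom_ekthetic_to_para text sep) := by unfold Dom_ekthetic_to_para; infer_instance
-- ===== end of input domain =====

-- B replaces split()+indexed loop by a streaming find()-based recursion over sep-chunks (alternative decomposition; return value only).


-- ===== PORT A =====
def ekthetic_to_para (text : String) (sep : String) : String :=
  match PySem.Chars.split? text.toList sep.toList with
  | none => ""   -- unreachable under Pre_ (text.split raises ValueError iff the separator is empty)
  | some units =>
    let out_units := (PySem.List.enumerate units 0).foldl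
      (fun out (p : Int × List Char) =>
        if p.1 == 0 then out ++ [p.2]
        else
          let u := sep.toList ++ p.2
          let u := if PySem.Chars.isIn "ekthetic".toList u then "<p p=\"p\"/>".toList ++ u
                   else if p.1 == 1 then "<p p=\"p\"/>".toList ++ u
                   else u
          out ++ [u]) []
    String.ofList (PySem.Chars.join [] out_units)

-- ===== PORT B =====
-- _tagged of Source B; fuel makes the find-driven recursion total (rest shrinks by ≥ |sep| each step)
def ekGo (fuel : Nat) (rest : List Char) (sep : List Char) (first : Bool) : List Char :=
  match fuel with
  | 0 => []
  | fuel + 1 =>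
    let nxt := PySem.Chars.findFrom rest sep (sep.length : Int)
    let chunk := if nxt == -1 then rest else rest.take nxt.toNat
    let tag := if first || PySem.Chars.isIn "ekthetic".toList chunk then "<p p=\"p\"/>".toList else []
    if nxt == -1 then tag ++ chunk
    else tag ++ chunk ++ ekGo fuel (rest.drop nxt.toNat) sep false

def ekthetic_to_para_alt (text : String) (sep : String) : String :=
  let k := PySem.Chars.find text.toList sep.toList
  if k == -1 then text
  else String.ofList (text.toList.take k.toNat ++
         ekGo (text.toList.length + 1) (text.toList.drop k.toNat) sep.toList true)

-- ===== PRECONDITION & SPEC =====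
-- Pre_ excludes only the empty separator, on which Python's str.split (A) and B's explicit guard raise ValueError.
def Pre_ekthetic_to_para (text : String) (sep : String) : Prop := sep ≠ ""
instance (text : String) (sep : String) : Decidable (Pre_ekthetic_to_para text sep) := by unfold Pre_ekthetic_to_para; infer_instance
def pvWitness_ekthetic_to_para : String × String := ("a<transb ekthetic<transc", "<trans")

def Spec_ekthetic_to_para (text : String) (sep : String) (out : String) : Prop := out = ekthetic_to_para_alt text sep
instance (text : String) (sep : String) (out : String) : Decidable (Spec_ekthetic_to_para text sep out) := by unfold Spec_ekthetic_to_para; infer_instance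

-- ===== CLAIM (what is proved, stated in full; the proofs are below) =====
def Claim_equal_ekthetic_to_para : Prop := ∀ (text : String) (sep : String), Dom_ekthetic_to_para text sep → Pre_ekthetic_to_para text sep → Spec_ekthetic_to_para text sep (ekthetic_to_para text sep)


-- ===== LEMMAS AND PROOFS =====

-- A's loop body, as a function of one (index, unit) pair.
def aStep (sep : List Char) (p : Int × List Char) : List Char :=
  if p.1 == 0 then p.2
  else
    let u := sep ++ p.2
    if PySem.Chars.isIn "ekthetic".toList u then "<p p=\"p\"/>".toList ++ u
    else if p.1 == 1 then "<p p=\"p\"/>".toList ++ u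
    else u

-- Unfuelled reference form of Python str.split(sep) for a NONEMPTY sep = s0 :: stl.
def mySplit (s0 : Char) (stl : List Char) : List Char → List Char → List (List Char)
  | [], cur => [cur.reverse]
  | c :: rest, cur =>
    if (s0 :: stl).isPrefixOf (c :: rest) then
      cur.reverse :: mySplit s0 stl (rest.drop stl.length) []
    else
      mySplit s0 stl rest (c :: cur)
termination_by l _ => l.length
decreasing_by
  · simpa using Nat.lt_succ_of_le (List.length_drop_le stl.length rest)
  · simp

-- What both programs compute on the unit list after the first split piece:
-- each unit u becomes sep ++ u, tagged if it is the first one or contains "ekthetic".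
def procUnits (sep : List Char) : Bool → List (List Char) → List Char
  | _, [] => []
  | first, u :: us =>
      (if first || PySem.Chars.isIn "ekthetic".toList (sep ++ u) then "<p p=\"p\"/>".toList else []) ++
        sep ++ u ++ procUnits sep false us

theorem join_nil_cons (x : List Char) (xs : List (List Char)) :
    PySem.Chars.join [] (x :: xs) = x ++ PySem.Chars.join [] xs := by
  cases xs with
  | nil => rw [PySem.Chars.join_singleton, PySem.Chars.join_nil, List.append_nil]
  | cons y ys => rw [PySem.Chars.join_cons_cons]; simp

theorem go_eq_mySplit (s0 : Char) (stl : List Char) :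
    ∀ (fuel : Nat) (l cur : List Char) (acc : List (List Char)), l.length < fuel →
      PySem.Chars.splitOn.go (s0 :: stl) fuel l cur acc = acc.reverse ++ mySplit s0 stl l cur := by
  intro fuel
  induction fuel with
  | zero => intro l cur acc h; omega
  | succ f ih =>
    intro l cur acc h
    match l with
    | [] =>
      rw [PySem.Chars.splitOn.go]
      · simp [mySplit]
      · omega
    | c :: rest =>
      rw [PySem.Chars.splitOn.go]
      by_cases hp : (s0 :: stl).isPrefixOf (c :: rest)
      · have hlen : (List.drop (s0 :: stl).length (c :: rest)).length < f := by
          simp only [List.length_drop, List.length_cons] at *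
          omega
        rw [if_pos hp, ih _ _ _ hlen]
        simp [mySplit, hp]
      · have hlen : rest.length < f := by simp at h; omega
        rw [if_neg hp, ih _ _ _ hlen]
        simp [mySplit, hp]

theorem splitOn_eq_mySplit (s0 : Char) (stl : List Char) (l : List Char) :
    PySem.Chars.splitOn l (s0 :: stl) = mySplit s0 stl l [] := by
  have := go_eq_mySplit s0 stl (l.length + 1) l [] [] (by omega)
  simp [PySem.Chars.splitOn] at this
  exact this

theorem mySplit_no_occ (s0 : Char) (stl : List Char) :
    ∀ (l cur : List Char), ¬ (s0 :: stl) <:+: l → mySplit s0 stl l cur = [cur.reverse ++ l] := by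
  intro l
  induction l with
  | nil => intro cur _; simp [mySplit]
  | cons c rest ih =>
    intro cur hni
    have hp : ¬ (s0 :: stl).isPrefixOf (c :: rest) := by
      intro hp
      exact hni ((List.isPrefixOf_iff_prefix.mp hp).isInfix)
    have hrest : ¬ (s0 :: stl) <:+: rest := fun hi => hni (hi.trans (List.infix_cons List.infix_rfl))
    rw [mySplit, if_neg hp, ih (c :: cur) hrest]
    simp

theorem mySplit_occ (s0 : Char) (stl : List Char) :
    ∀ (k : Nat) (l cur : List Char), (s0 :: stl) <+: l.drop k →
      (∀ i < k, ¬ (s0 :: stl) <+: l.drop i) →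
      mySplit s0 stl l cur =
        (cur.reverse ++ l.take k) :: mySplit s0 stl (l.drop (k + stl.length + 1)) [] := by
  intro k
  induction k with
  | zero =>
    intro l cur hpre _
    simp only [List.drop_zero] at hpre
    match l, hpre with
    | _, ⟨t, rfl⟩ =>
      rw [List.cons_append, mySplit,
        if_pos (List.isPrefixOf_iff_prefix.mpr ⟨t, by simp⟩)]
      simp
  | succ k ih =>
    intro l cur hpre hmin
    match l with
    | [] => simp at hpre
    | c :: rest =>
      have hp : ¬ (s0 :: stl).isPrefixOf (c :: rest) := by
        intro hp
        exact hmin 0 (by omega) (by simpa using List.isPrefixOf_iff_prefix.mp hp)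
      have harith : k + 1 + stl.length + 1 = (k + stl.length + 1) + 1 := by omega
      rw [mySplit, if_neg hp,
        ih rest (c :: cur) (by simpa using hpre)
          (fun i hi => by simpa using hmin (i + 1) (by omega)),
        harith]
      simp

theorem splitOn_no_occ (s0 : Char) (stl : List Char) (l : List Char)
    (h : ¬ (s0 :: stl) <:+: l) : PySem.Chars.splitOn l (s0 :: stl) = [l] := by
  rw [splitOn_eq_mySplit, mySplit_no_occ s0 stl l [] h]; simp

theorem splitOn_occ (s0 : Char) (stl : List Char) (l : List Char) (k : Nat)
    (hpre : (s0 :: stl) <+: l.drop k) (hmin : ∀ i < k, ¬ (s0 :: stl) <+: l.drop i) :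
    PySem.Chars.splitOn l (s0 :: stl) =
      l.take k :: PySem.Chars.splitOn (l.drop (k + stl.length + 1)) (s0 :: stl) := by
  rw [splitOn_eq_mySplit, mySplit_occ s0 stl k l [] hpre hmin, splitOn_eq_mySplit]
  simp

-- A's loop from index 2 on: every later unit is tagged iff it contains "ekthetic".
theorem join_map_enum_ge_two (sep : List Char) :
    ∀ (us : List (List Char)) (i : Int), 2 ≤ i →
      PySem.Chars.join [] ((PySem.List.enumerate us i).map (aStep sep)) = procUnits sep false us := by
  intro us
  induction us with
  | nil => intro i _; simp [PySem.List.enumerate_nil, PySem.Chars.join_nil, procUnits]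
  | cons u us ih =>
    intro i hi
    have h0 : (i == 0) = false := by simp; omega
    have h1 : (i == 1) = false := by simp; omega
    rw [PySem.List.enumerate_cons, List.map_cons, join_nil_cons, ih (i + 1) (by omega), procUnits]
    simp only [aStep, h0, h1, Bool.false_eq_true, if_false, Bool.false_or]
    split <;> simp

-- A's loop from index 1 on: the first trans unit is always tagged.
theorem join_map_enum_one (sep : List Char) (us : List (List Char)) :
    PySem.Chars.join [] ((PySem.List.enumerate us 1).map (aStep sep)) = procUnits sep true us := by
  cases us with
  | nil => simp [PySem.List.enumerate_nil, PySem.Chars.join_nil, procUnits]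
  | cons u us' =>
    rw [PySem.List.enumerate_cons, List.map_cons, join_nil_cons,
      (by norm_num : (1 : Int) + 1 = 2), join_map_enum_ge_two sep us' 2 (by omega), procUnits]
    simp only [aStep, show ((1 : Int) == 0) = false from rfl, show ((1 : Int) == 1) = true from rfl,
      Bool.false_eq_true, if_false, if_true]
    split <;> simp

-- A's foldl-with-append loop is a map over the enumerated units.
theorem aFold (sp : List Char) (units : List (List Char)) :
    (PySem.List.enumerate units 0).foldl
      (fun out (p : Int × List Char) =>
        if p.1 == 0 then out ++ [p.2]
        else
          let u := sp ++ p.2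
          let u := if PySem.Chars.isIn "ekthetic".toList u then "<p p=\"p\"/>".toList ++ u
                   else if p.1 == 1 then "<p p=\"p\"/>".toList ++ u
                   else u
          out ++ [u]) [] = (PySem.List.enumerate units 0).map (aStep sp) := by
  have hfun : (fun out (p : Int × List Char) =>
        if p.1 == 0 then out ++ [p.2]
        else
          let u := sp ++ p.2
          let u := if PySem.Chars.isIn "ekthetic".toList u then "<p p=\"p\"/>".toList ++ u
                   else if p.1 == 1 then "<p p=\"p\"/>".toList ++ u
                   else u
          out ++ [u]) =
      (fun out (p : Int × List Char) => out ++ [aStep sp p]) := by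
    funext out p
    by_cases h : (p.1 == 0) = true <;> simp [aStep, h]
  rw [hfun, PySem.List.foldl_append_singleton_eq_map]
  simp

-- B's recursion computes procUnits of the split of what follows the leading sep.
theorem ekGo_eq_procUnits (s0 : Char) (stl : List Char) :
    ∀ (fuel : Nat) (rest : List Char) (first : Bool), rest.length < fuel →
      (s0 :: stl) <+: rest →
      ekGo fuel rest (s0 :: stl) first =
        procUnits (s0 :: stl) first
          (PySem.Chars.splitOn (rest.drop (stl.length + 1)) (s0 :: stl)) := by
  intro fuel
  induction fuel with
  | zero => intro rest first h _; omega
  | succ f ih =>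
    intro rest first h hpre
    obtain ⟨t', rfl⟩ := hpre
    have hdrop : ((s0 :: stl) ++ t').drop (stl.length + 1) = t' := by
      have := List.drop_length_add_append (l₁ := s0 :: stl) 0 (l₂ := t')
      simp at this
      simpa using this
    have hsl : ((s0 :: stl) ++ t').length = stl.length + 1 + t'.length := by simp; omega
    have hk : stl.length + 1 ≤ ((s0 :: stl) ++ t').length := by omega
    rw [ekGo]
    simp only [List.length_cons]
    have hfind := PySem.Chars.findFrom_natCast ((s0 :: stl) ++ t') (s0 :: stl) (stl.length + 1) hk
    by_cases hocc : (s0 :: stl) <:+: t'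
    · -- another occurrence: recurse
      have hnn : 0 ≤ PySem.Chars.find t' (s0 :: stl) :=
        (PySem.Chars.find_nonneg_iff t' (s0 :: stl)).mpr hocc
      have hne : PySem.Chars.find t' (s0 :: stl) ≠ -1 := by omega
      obtain ⟨hp2, hmin2⟩ := PySem.Chars.find_spec hnn
      set m : Nat := (PySem.Chars.find t' (s0 :: stl)).toNat with hm
      have hfv : PySem.Chars.find t' (s0 :: stl) = (m : Int) := by omega
      have hnxt : PySem.Chars.findFrom ((s0 :: stl) ++ t') (s0 :: stl) (↑(stl.length + 1)) =
          ((stl.length + 1 + m : Nat) : Int) := by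
        rw [hfind, hdrop, if_neg hne, hfv]; push_cast; ring
      have hmlen : m + (stl.length + 1) ≤ t'.length := by
        have := hp2.length_le
        simp only [List.length_drop, List.length_cons] at this ⊢
        omega
      rw [hnxt]
      have hbeq : (((stl.length + 1 + m : Nat) : Int) == -1) = false := by
        simp; omega
      rw [hbeq]
      simp only [Bool.false_eq_true, if_false, Int.toNat_natCast]
      have htake : ((s0 :: stl) ++ t').take (stl.length + 1 + m) = (s0 :: stl) ++ t'.take m := by
        simpa using List.take_length_add_append (l₁ := s0 :: stl) m (l₂ := t')
      have htail : ((s0 :: stl) ++ t').drop (stl.length + 1 + m) = t'.drop m := by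
        simpa using List.drop_length_add_append (l₁ := s0 :: stl) m (l₂ := t')
      have htail2 : (t'.drop m).drop (stl.length + 1) = t'.drop (m + stl.length + 1) := by
        rw [List.drop_drop, show m + (stl.length + 1) = m + stl.length + 1 from by omega]
      have hlen2 : (t'.drop m).length < f := by
        simp only [List.length_drop]
        omega
      rw [htake, htail, ih (t'.drop m) false hlen2 hp2, htail2, hdrop,
        splitOn_occ s0 stl t' m hp2 hmin2, procUnits]
      simp
    · -- last chunk
      have hfv : PySem.Chars.find t' (s0 :: stl) = -1 :=
        (PySem.Chars.find_eq_neg_one_iff t' (s0 :: stl)).mpr hocc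
      have hnxt : PySem.Chars.findFrom ((s0 :: stl) ++ t') (s0 :: stl) (↑(stl.length + 1)) = -1 := by
        rw [hfind, hdrop, if_pos hfv]
      rw [hnxt]
      simp only [BEq.rfl, if_true]
      rw [hdrop, splitOn_no_occ s0 stl t' hocc, procUnits, procUnits]
      simp

-- ===== VERDICT (by name: the statement is the Claim_ definition above) =====
theorem ekthetic_to_para_spec : Claim_equal_ekthetic_to_para := by
  intro text sep _ hpre
  show ekthetic_to_para text sep = ekthetic_to_para_alt text sep
  have hsep : sep.toList ≠ [] := by
    intro h
    exact hpre (by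
      have := congrArg String.ofList h
      simpa using this)
  match hsl : sep.toList with
  | [] => exact absurd hsl hsep
  | s0 :: stl =>
    unfold ekthetic_to_para ekthetic_to_para_alt
    rw [PySem.Chars.split?.eq_1, hsl]
    simp only [List.isEmpty_cons, Bool.false_eq_true, if_false]
    by_cases hocc : (s0 :: stl) <:+: text.toList
    · -- sep occurs in text
      have hnn : 0 ≤ PySem.Chars.find text.toList (s0 :: stl) :=
        (PySem.Chars.find_nonneg_iff text.toList (s0 :: stl)).mpr hocc
      obtain ⟨hp2, hmin2⟩ := PySem.Chars.find_spec hnn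
      set k : Nat := (PySem.Chars.find text.toList (s0 :: stl)).toNat with hk
      have hbeq : (PySem.Chars.find text.toList (s0 :: stl) == -1) = false := by
        simp; omega
      rw [hbeq]
      simp only [Bool.false_eq_true, if_false]
      rw [splitOn_occ s0 stl text.toList k hp2 hmin2]
      rw [aFold, PySem.List.enumerate_cons, List.map_cons, join_nil_cons,
        (by norm_num : (0 : Int) + 1 = 1), join_map_enum_one]
      have hlen : (text.toList.drop k).length < text.toList.length + 1 := by
        simp only [List.length_drop]; omega
      rw [ekGo_eq_procUnits s0 stl (text.toList.length + 1) (text.toList.drop k) true hlen hp2,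
        List.drop_drop, show k + (stl.length + 1) = k + stl.length + 1 from by omega]
      simp [aStep]
    · -- sep does not occur: both return text unchanged
      have hfv : PySem.Chars.find text.toList (s0 :: stl) = -1 :=
        (PySem.Chars.find_eq_neg_one_iff text.toList (s0 :: stl)).mpr hocc
      rw [splitOn_no_occ s0 stl text.toList hocc, hfv]
      simp only [BEq.rfl, if_true]
      rw [aFold, PySem.List.enumerate_cons, List.map_cons, PySem.List.enumerate_nil,
        List.map_nil, PySem.Chars.join_singleton]
      simp [aStep, String.ofList_toList]
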